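-- pv_equiv track=rewrite | github.com/netwrix-tkm/Netwrix-Knowledge-Base | kb-config/kb-sfdc-migration/convert_kb_to_html.py | get_product_folder
-- ===== SOURCE A (Python) =====
-- PRODUCT_MAPPING = {
--     'access_info_center': 'access-information-center',
--     'activity_monitor': 'activity-monitor',
--     'onesecure': '1secure',
--     'auditor': 'auditor',
--     'change_tracker': 'change-tracker',
--     'data_classification': 'data-classification',
--     'endpoint_protector': 'endpoint-protector',
--     'groupid': 'directory-manager',
--     'log_tracker': 'log-tracker',
--     'password_policy_enforcer': 'password-policy-enforcer',
--     'password_reset_manager': 'password-reset',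
--     'password_secure': 'password-secure',
--     'policypak': 'endpoint-policy-manager',
--     'privilege_secure_endpoints': 'endpoint-privilege-manager',
--     'privilege_secure': 'privilege-secure-access-management',
--     'privilege_secure_discovery': 'privilege-secure-discovery',
--     'recovery_ad': 'recovery-for-active-directory',
--     'enterprise_auditor': 'access-analyzer',
--     'threat_manager': 'threat-manager',
--     'threat_prevention': 'threat-prevention',
--     'strongpoint_netsuite': 'platform-governance-netsuite',
--     'strongpoint_salesforce': 'platform-governance-salesforce',
--     'usercube': 'identity-manager',
--     'vulnerability_tracker': 'vulnerability-tracker'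
-- }
--
-- def get_product_folder(categories, article_id):
--     """Determine the product folder based on categories"""
--     if article_id not in categories:
--         return "uncategorized"
--
--     article_categories = categories[article_id]
--
--     # Check for exact matches first
--     for category in article_categories:
--         if category in PRODUCT_MAPPING:
--             return PRODUCT_MAPPING[category]
--
--     # Fallback to first category with a mapping
--     for category in article_categories:
--         if category in PRODUCT_MAPPING.values():
--             return category
--
--     return "uncategorized"
-- ===== SOURCE B (Python) =====
-- PRODUCT_MAPPING = {
--     'access_info_center': 'access-information-center',
--     'activity_monitor': 'activity-monitor',
--     'onesecure': '1secure',
--     'auditor': 'auditor',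
--     'change_tracker': 'change-tracker',
--     'data_classification': 'data-classification',
--     'endpoint_protector': 'endpoint-protector',
--     'groupid': 'directory-manager',
--     'log_tracker': 'log-tracker',
--     'password_policy_enforcer': 'password-policy-enforcer',
--     'password_reset_manager': 'password-reset',
--     'password_secure': 'password-secure',
--     'policypak': 'endpoint-policy-manager',
--     'privilege_secure_endpoints': 'endpoint-privilege-manager',
--     'privilege_secure': 'privilege-secure-access-management',
--     'privilege_secure_discovery': 'privilege-secure-discovery',
--     'recovery_ad': 'recovery-for-active-directory',
--     'enterprise_auditor': 'access-analyzer',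
--     'threat_manager': 'threat-manager',
--     'threat_prevention': 'threat-prevention',
--     'strongpoint_netsuite': 'platform-governance-netsuite',
--     'strongpoint_salesforce': 'platform-governance-salesforce',
--     'usercube': 'identity-manager',
--     'vulnerability_tracker': 'vulnerability-tracker'
-- }
--
-- _FOLDERS = set(PRODUCT_MAPPING.values())
--
-- def get_product_folder(categories, article_id):
--     """Rank every matching category (key matches rank i, folder-name matches rank
--     n+i, so every key match beats every folder-name match and earlier beats later)
--     and return the folder of the best-ranked one."""
--     if article_id not in categories:
--         return "uncategorized"
--     cats = categories[article_id]
--     n = len(cats)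
--     ranked = []
--     for i, c in enumerate(cats):
--         mapped = PRODUCT_MAPPING.get(c)
--         if mapped is not None:
--             ranked.append((i, mapped))
--         elif c in _FOLDERS:
--             ranked.append((n + i, c))
--     if not ranked:
--         return "uncategorized"
--     return min(ranked, key=lambda t: t[0])[1]
-- ===== Notes on version B (the rewrite author's own statement) =====
-- stated objective: alternative
-- what changed: Replaces A's two sequential scans with a rank-and-select algorithm: one enumeration assigns every matching category a numeric rank (key matches rank i, folder-name matches rank n+i) and the answer is the folder of the minimum-rank candidate.
import Mathlib
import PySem

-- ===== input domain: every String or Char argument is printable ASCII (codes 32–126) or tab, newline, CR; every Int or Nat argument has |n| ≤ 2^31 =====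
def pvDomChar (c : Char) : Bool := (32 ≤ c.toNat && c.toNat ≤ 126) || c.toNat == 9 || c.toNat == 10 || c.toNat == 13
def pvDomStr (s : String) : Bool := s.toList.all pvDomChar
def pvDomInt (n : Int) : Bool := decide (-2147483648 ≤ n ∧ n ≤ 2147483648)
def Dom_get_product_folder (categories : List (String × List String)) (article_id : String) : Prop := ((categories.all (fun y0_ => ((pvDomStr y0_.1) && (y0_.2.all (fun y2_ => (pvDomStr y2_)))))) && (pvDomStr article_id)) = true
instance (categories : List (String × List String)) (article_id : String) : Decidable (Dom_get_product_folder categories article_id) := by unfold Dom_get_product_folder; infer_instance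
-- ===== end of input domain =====

-- B replaces A's two sequential scans by a rank-and-select algorithm (key matches rank i,
-- folder-name matches rank n+i; answer = folder of the minimum-rank candidate); equivalence
-- on the whole input space, no precondition.

-- ===== PORT A =====
def productMapping : List (String × String) := [
  ("access_info_center", "access-information-center"),
  ("activity_monitor", "activity-monitor"),
  ("onesecure", "1secure"),
  ("auditor", "auditor"),
  ("change_tracker", "change-tracker"),
  ("data_classification", "data-classification"),
  ("endpoint_protector", "endpoint-protector"),
  ("groupid", "directory-manager"),
  ("log_tracker", "log-tracker"),
  ("password_policy_enforcer", "password-policy-enforcer"),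
  ("password_reset_manager", "password-reset"),
  ("password_secure", "password-secure"),
  ("policypak", "endpoint-policy-manager"),
  ("privilege_secure_endpoints", "endpoint-privilege-manager"),
  ("privilege_secure", "privilege-secure-access-management"),
  ("privilege_secure_discovery", "privilege-secure-discovery"),
  ("recovery_ad", "recovery-for-active-directory"),
  ("enterprise_auditor", "access-analyzer"),
  ("threat_manager", "threat-manager"),
  ("threat_prevention", "threat-prevention"),
  ("strongpoint_netsuite", "platform-governance-netsuite"),
  ("strongpoint_salesforce", "platform-governance-salesforce"),
  ("usercube", "identity-manager"),
  ("vulnerability_tracker", "vulnerability-tracker")]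

-- `category in PRODUCT_MAPPING` + `PRODUCT_MAPPING[category]` (first-match dict lookup)
def pmGet? (c : String) : Option String :=
  (productMapping.find? (fun p => p.1 == c)).map Prod.snd

-- first-match lookup in the categories dict (A's `article_id not in categories` + indexing)
def assocGet? (d : List (String × List String)) (k : String) : Option (List String) :=
  match d with
  | [] => none
  | (k', v) :: rest => if k' == k then some v else assocGet? rest k

-- A's first loop: return PRODUCT_MAPPING[category] at the first key match
def gpfLoop1 : List String → Option String
  | [] => none
  | c :: rest =>
    match pmGet? c with
    | some v => some v
    | none => gpfLoop1 rest

-- A's second loop: return the first category that is one of PRODUCT_MAPPING's values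
def gpfLoop2 : List String → Option String
  | [] => none
  | c :: rest =>
    if (productMapping.map Prod.snd).contains c then some c else gpfLoop2 rest

def get_product_folder (categories : List (String × List String)) (article_id : String) : String :=
  match assocGet? categories article_id with
  | none => "uncategorized"
  | some cats =>
    match gpfLoop1 cats with
    | some v => v
    | none =>
      match gpfLoop2 cats with
      | some c => c
      | none => "uncategorized"

-- ===== PORT B =====
-- _FOLDERS = set(PRODUCT_MAPPING.values())
def folderSet : PySem.Set String := PySem.Set.ofList (productMapping.map Prod.snd)

-- the ranked candidates one category (i, c) contributes: key match → rank i, folder-name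
-- match → rank n+i, otherwise nothing ('if: append / elif: append' in the loop body)
def rankOf (n : Int) (ic : Int × String) : List (Int × String) :=
  match pmGet? ic.2 with
  | some v => [(ic.1, v)]
  | none => if folderSet.contains ic.2 then [(n + ic.1, ic.2)] else []

def get_product_folder_alt (categories : List (String × List String)) (article_id : String) : String :=
  match (categories.find? (fun p => p.1 == article_id)).map Prod.snd with
  | none => "uncategorized"
  | some cats =>
    let ranked := (PySem.List.enumerate cats).foldl
      (fun acc ic => acc ++ rankOf (cats.length : Int) ic) []
    match PySem.List.min? ranked (fun t => t.1) with
    | none => "uncategorized"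
    | some t => t.2

-- ===== PRECONDITION & SPEC =====
def Spec_get_product_folder (categories : List (String × List String)) (article_id : String) (out : String) : Prop := out = get_product_folder_alt categories article_id
instance (categories : List (String × List String)) (article_id : String) (out : String) : Decidable (Spec_get_product_folder categories article_id out) := by unfold Spec_get_product_folder; infer_instance

-- ===== CLAIM =====
def Claim_equal_get_product_folder : Prop := ∀ (categories : List (String × List String)) (article_id : String), Dom_get_product_folder categories article_id → Spec_get_product_folder categories article_id (get_product_folder categories article_id)

-- ===== LEMMAS AND PROOFS =====

-- the two dict lookups agree (find?-style vs hand recursion)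
theorem find?_eq_assocGet? (d : List (String × List String)) (k : String) :
    (d.find? (fun p => p.1 == k)).map Prod.snd = assocGet? d k := by
  induction d with
  | nil => rfl
  | cons p rest ih =>
    obtain ⟨k', v⟩ := p
    simp only [List.find?, assocGet?]
    by_cases h : (k' == k) = true <;> simp [h, ih]

-- membership in _FOLDERS is membership among PRODUCT_MAPPING's values
theorem folderSet_contains (c : String) :
    folderSet.contains c = (productMapping.map Prod.snd).contains c := by
  simp only [folderSet, PySem.Set.contains, List.contains_eq_mem]
  simp [PySem.Set.mem_ofList]

-- what one category contributes to the ranked list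
theorem mem_rankOf (n i : Int) (c : String) (p : Int × String) :
    p ∈ rankOf n (i, c) ↔
      (pmGet? c = some p.2 ∧ p.1 = i) ∨
      (pmGet? c = none ∧ (productMapping.map Prod.snd).contains c = true ∧
        p.1 = n + i ∧ p.2 = c) := by
  simp only [rankOf, folderSet_contains]
  cases h : pmGet? c with
  | some v =>
    simp only [List.mem_singleton, Prod.ext_iff]
    constructor
    · rintro ⟨h1, h2⟩; exact Or.inl ⟨by rw [h2], h1⟩
    · rintro (⟨h1, h2⟩ | ⟨h1, hx⟩)
      · exact ⟨h2, (Option.some_inj.mp h1).symm⟩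
      · exact absurd h1 (by simp)
  | none =>
    by_cases hc : ((productMapping.map Prod.snd).contains c) = true
    · rw [if_pos hc]
      simp only [List.mem_singleton, Prod.ext_iff]
      constructor
      · rintro ⟨h1, h2⟩; exact Or.inr ⟨trivial, hc, h1, h2⟩
      · rintro (⟨h1, _⟩ | ⟨_, _, h3, h4⟩)
        · exact absurd h1 (by simp)
        · exact ⟨h3, h4⟩
    · rw [if_neg hc]
      simp only [List.not_mem_nil, false_iff]
      rintro (⟨h1, _⟩ | ⟨_, h2, _⟩)
      · exact absurd h1 (by simp)
      · exact hc h2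

-- characterisation of the ranked list's members
theorem mem_ranked (cats : List String) (n : Int) (p : Int × String) :
    p ∈ (PySem.List.enumerate cats).foldl
        (fun acc ic => acc ++ rankOf n ic) [] ↔
      ∃ k, ∃ _ : k < cats.length,
        (pmGet? cats[k] = some p.2 ∧ p.1 = (k : Int)) ∨
        (pmGet? cats[k] = none ∧ (productMapping.map Prod.snd).contains cats[k] = true ∧
          p.1 = n + (k : Int) ∧ p.2 = cats[k]) := by
  rw [PySem.List.foldl_append_eq_flatMap]
  simp only [List.nil_append, List.mem_flatMap]
  constructor
  · rintro ⟨ic, hic, hp⟩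
    rw [PySem.List.mem_enumerate_iff] at hic
    obtain ⟨k, hk, rfl⟩ := hic
    refine ⟨k, hk, ?_⟩
    rw [mem_rankOf] at hp
    simpa using hp
  · rintro ⟨k, hk, hcase⟩
    refine ⟨((0 : Int) + (k : Int), cats[k]), ?_, ?_⟩
    · rw [PySem.List.mem_enumerate_iff]; exact ⟨k, hk, rfl⟩
    · rw [mem_rankOf]; simpa using hcase

-- A's loop1: a 'some' result is the value at the FIRST key match
theorem loop1_some (cats : List String) (v : String) (h : gpfLoop1 cats = some v) :
    ∃ k, ∃ hk : k < cats.length, pmGet? cats[k] = some v ∧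
      ∀ j (hj : j < k), pmGet? (cats[j]'(by omega)) = none := by
  induction cats with
  | nil => simp [gpfLoop1] at h
  | cons c rest ih =>
    simp only [gpfLoop1] at h
    cases hc : pmGet? c with
    | some w =>
      rw [hc] at h
      refine ⟨0, by simp, ?_, ?_⟩
      · rw [List.getElem_cons_zero, hc]; exact h
      · intro j hj; omega
    | none =>
      rw [hc] at h
      obtain ⟨k, hk, h1, h2⟩ := ih h
      refine ⟨k + 1, by simp only [List.length_cons]; omega, ?_, ?_⟩
      · rw [List.getElem_cons_succ]; exact h1
      · intro j hj
        cases j with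
        | zero => rw [List.getElem_cons_zero]; exact hc
        | succ j' => rw [List.getElem_cons_succ]; exact h2 j' (by omega)

-- A's loop1: 'none' means no category is a key
theorem loop1_none (cats : List String) (h : gpfLoop1 cats = none) :
    ∀ k (hk : k < cats.length), pmGet? cats[k] = none := by
  induction cats with
  | nil => intro k hk; simp at hk
  | cons c rest ih =>
    simp only [gpfLoop1] at h
    cases hc : pmGet? c with
    | some w => rw [hc] at h; simp at h
    | none =>
      rw [hc] at h
      intro k hk
      cases k with
      | zero => rw [List.getElem_cons_zero]; exact hc
      | succ k' =>
        rw [List.getElem_cons_succ]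
        exact ih h k' (by simp only [List.length_cons] at hk; omega)

-- A's loop2: a 'some' result is the FIRST category that is a folder name
theorem loop2_some (cats : List String) (c : String) (h : gpfLoop2 cats = some c) :
    ∃ k, ∃ hk : k < cats.length, cats[k] = c ∧
      (productMapping.map Prod.snd).contains c = true ∧
      ∀ j (hj : j < k), (productMapping.map Prod.snd).contains (cats[j]'(by omega)) = false := by
  induction cats with
  | nil => simp [gpfLoop2] at h
  | cons x rest ih =>
    simp only [gpfLoop2] at h
    by_cases hx : ((productMapping.map Prod.snd).contains x) = true
    · rw [if_pos hx] at h
      refine ⟨0, by simp, ?_, ?_, ?_⟩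
      · rw [List.getElem_cons_zero]; exact Option.some_inj.mp h
      · rw [← Option.some_inj.mp h]; exact hx
      · intro j hj; omega
    · rw [if_neg hx] at h
      obtain ⟨k, hk, h1, h2, h3⟩ := ih h
      refine ⟨k + 1, by simp only [List.length_cons]; omega, ?_, h2, ?_⟩
      · rw [List.getElem_cons_succ]; exact h1
      · intro j hj
        cases j with
        | zero => rw [List.getElem_cons_zero]; exact eq_false_of_ne_true hx
        | succ j' => rw [List.getElem_cons_succ]; exact h3 j' (by omega)

-- A's loop2: 'none' means no category is a folder name
theorem loop2_none (cats : List String) (h : gpfLoop2 cats = none) :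
    ∀ k (hk : k < cats.length), (productMapping.map Prod.snd).contains cats[k] = false := by
  induction cats with
  | nil => intro k hk; simp at hk
  | cons x rest ih =>
    simp only [gpfLoop2] at h
    by_cases hx : ((productMapping.map Prod.snd).contains x) = true
    · rw [if_pos hx] at h; simp at h
    · rw [if_neg hx] at h
      intro k hk
      cases k with
      | zero => rw [List.getElem_cons_zero]; exact eq_false_of_ne_true hx
      | succ k' =>
        rw [List.getElem_cons_succ]
        exact ih h k' (by simp only [List.length_cons] at hk; omega)

-- the heart: for one article's category list, A's two scans and B's rank-and-select agree
theorem inner_eq (cats : List String) :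
    (match gpfLoop1 cats with
     | some v => v
     | none => match gpfLoop2 cats with
       | some c => c
       | none => "uncategorized") =
    (match PySem.List.min?
        ((PySem.List.enumerate cats).foldl
          (fun acc ic => acc ++ rankOf (cats.length : Int) ic) [])
        (fun t => t.1) with
     | none => "uncategorized"
     | some t => t.2) := by
  set n : Int := (cats.length : Int) with hn
  set ranked := (PySem.List.enumerate cats).foldl
      (fun acc ic => acc ++ rankOf n ic) [] with hranked
  cases h1 : gpfLoop1 cats with
  | some v =>
    -- first key match at index k0
    obtain ⟨k0, hk0, hkm, hfirst⟩ := loop1_some cats v h1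
    have hmem : ((k0 : Int), v) ∈ ranked := by
      rw [hranked, mem_ranked]
      exact ⟨k0, hk0, Or.inl ⟨hkm, rfl⟩⟩
    cases hmin : PySem.List.min? ranked (fun t => t.1) with
    | none =>
      rw [PySem.List.min?_eq_none_iff] at hmin
      rw [hmin] at hmem; simp at hmem
    | some m =>
      have hm := PySem.List.min?_mem hmin
      have hle := PySem.List.min?_isMin hmin _ hmem
      rw [hranked, mem_ranked] at hm
      obtain ⟨k, hk, hcase⟩ := hm
      show v = m.2
      rcases hcase with ⟨hkm', hidx⟩ | ⟨_, _, hidx, _⟩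
      · -- m is a key match at index k ≤ k0; firstness forces k = k0
        rw [hidx] at hle
        have hkk0 : k ≤ k0 := by simp only [] at hle; exact_mod_cast hle
        have hkeq : k = k0 := by
          rcases Nat.lt_or_ge k k0 with hlt | hge
          · exact absurd hkm' (by rw [hfirst k hlt]; simp)
          · omega
        subst hkeq
        rw [hkm] at hkm'
        exact Option.some_inj.mp hkm'
      · -- m a folder-name match: rank n + k ≥ n > k0, contradicting minimality
        exfalso
        rw [hidx] at hle
        have hknn : (0:Int) ≤ (k : Int) := by positivity
        have hk0n : (k0 : Int) < n := by rw [hn]; exact_mod_cast hk0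
        omega
  | none =>
    have hall1 := loop1_none cats h1
    cases h2 : gpfLoop2 cats with
    | some c =>
      obtain ⟨k0, hk0, hck, hcv, hfirst⟩ := loop2_some cats c h2
      have hmem : (n + (k0 : Int), c) ∈ ranked := by
        rw [hranked, mem_ranked]
        exact ⟨k0, hk0, Or.inr ⟨hall1 k0 hk0, by rw [hck]; exact hcv, rfl, hck.symm⟩⟩
      cases hmin : PySem.List.min? ranked (fun t => t.1) with
      | none =>
        rw [PySem.List.min?_eq_none_iff] at hmin
        rw [hmin] at hmem; simp at hmem
      | some m =>
        have hm := PySem.List.min?_mem hmin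
        have hle := PySem.List.min?_isMin hmin _ hmem
        rw [hranked, mem_ranked] at hm
        obtain ⟨k, hk, hcase⟩ := hm
        show c = m.2
        rcases hcase with ⟨hkm', _⟩ | ⟨_, hcont, hidx, hval⟩
        · exact absurd hkm' (by rw [hall1 k hk]; simp)
        · -- folder-name match at index k ≤ k0; firstness forces k = k0
          rw [hidx] at hle
          have hkk0 : k ≤ k0 := by omega
          have hkeq : k = k0 := by
            rcases Nat.lt_or_ge k k0 with hlt | hge
            · exact absurd hcont (by rw [hfirst k hlt]; simp)
            · omega
          subst hkeq
          rw [hval, hck]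
    | none =>
      have hall2 := loop2_none cats h2
      have hempty : ranked = [] := by
        rw [List.eq_nil_iff_forall_not_mem]
        intro p hp
        rw [hranked, mem_ranked] at hp
        obtain ⟨k, hk, hcase⟩ := hp
        rcases hcase with ⟨hkm', _⟩ | ⟨_, hcont, _, _⟩
        · exact absurd hkm' (by rw [hall1 k hk]; simp)
        · exact absurd hcont (by rw [hall2 k hk]; simp)
      rw [hempty]
      rfl

-- ===== VERDICT =====
theorem get_product_folder_spec : Claim_equal_get_product_folder := by
  intro categories article_id _
  unfold Spec_get_product_folder get_product_folder get_product_folder_alt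
  rw [find?_eq_assocGet?]
  cases assocGet? categories article_id with
  | none => rfl
  | some cats => exact inner_eq cats
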